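-- pv_equiv track=rewrite | github.com/microsoft/ML-For-Beginners | .venv/Lib/site-packages/fontTools/varLib/varStore.py | _row_characteristics
-- ===== SOURCE A (Python) =====
-- def _row_characteristics(row):
--     """Returns encoding characteristics for a row."""
--     longWords = False
--
--     chars = 0
--     i = 1
--     for v in row:
--         if v:
--             chars += i
--         if not (-128 <= v <= 127):
--             chars += i * 0b0010
--         if not (-32768 <= v <= 32767):
--             longWords = True
--             break
--         i <<= 4
--
--     if longWords:
--         # Redo; only allow 2byte/4byte encoding
--         chars = 0
--         i = 1
--         for v in row:
--             if v:
--                 chars += i * 0b0011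
--             if not (-32768 <= v <= 32767):
--                 chars += i * 0b1100
--             i <<= 4
--
--     return chars
-- ===== SOURCE B (Python) =====
-- def _row_characteristics(row):
--     """Returns encoding characteristics for a row."""
--     longWords = any(not (-32768 <= v <= 32767) for v in row)
--     chars = 0
--     i = 1
--     for v in row:
--         if longWords:
--             if v:
--                 chars += i * 0b0011
--             if not (-32768 <= v <= 32767):
--                 chars += i * 0b1100
--         else:
--             if v:
--                 chars += i
--             if not (-128 <= v <= 127):
--                 chars += i * 0b0010
--         i <<= 4
--     return chars
-- ===== Notes on version B (the rewrite author's own statement) =====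
-- stated objective: simpler
-- what changed: B first computes the long-word flag with a standalone any() scan, then accumulates the bitmask in one unified loop, replacing A's early-break first loop followed by a conditional full redo.
import Mathlib
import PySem

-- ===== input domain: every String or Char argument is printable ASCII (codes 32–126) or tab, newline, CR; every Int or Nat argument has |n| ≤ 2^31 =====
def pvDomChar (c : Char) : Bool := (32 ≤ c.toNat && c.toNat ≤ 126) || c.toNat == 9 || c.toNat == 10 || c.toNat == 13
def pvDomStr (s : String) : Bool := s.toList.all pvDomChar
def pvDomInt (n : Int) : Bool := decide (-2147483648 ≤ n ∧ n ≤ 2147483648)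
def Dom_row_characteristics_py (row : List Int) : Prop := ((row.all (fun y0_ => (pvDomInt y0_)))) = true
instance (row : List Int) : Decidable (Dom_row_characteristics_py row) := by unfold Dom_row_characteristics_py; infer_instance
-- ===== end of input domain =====

-- B replaces A's early-break loop plus conditional full redo by a standalone any() flag scan
-- followed by one unified accumulation loop (objective: simpler).

-- ===== PORT A =====
-- A's first loop: accumulates chars, breaks with longWords = true on an out-of-16-bit value.
def rcLoopA1 : List Int → Int → Int → Int × Bool
  | [], chars, _ => (chars, false)
  | v :: rest, chars, i =>
    let chars := if v ≠ 0 then chars + i else chars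
    let chars := if ¬(-128 ≤ v ∧ v ≤ 127) then chars + i * 2 else chars
    if ¬(-32768 ≤ v ∧ v ≤ 32767) then (chars, true)
    else rcLoopA1 rest chars (i <<< 4)

-- A's redo loop (2byte/4byte encoding only).
def rcLoopA2 : List Int → Int → Int → Int
  | [], chars, _ => chars
  | v :: rest, chars, i =>
    let chars := if v ≠ 0 then chars + i * 3 else chars
    let chars := if ¬(-32768 ≤ v ∧ v ≤ 32767) then chars + i * 12 else chars
    rcLoopA2 rest chars (i <<< 4)

def row_characteristics_py (row : List Int) : Int :=
  let r := rcLoopA1 row 0 1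
  if r.2 then rcLoopA2 row 0 1 else r.1

-- ===== PORT B =====
-- B's single unified loop, branching on the precomputed longWords flag.
def rcLoopB : List Int → Bool → Int → Int → Int
  | [], _, chars, _ => chars
  | v :: rest, longWords, chars, i =>
    let chars :=
      if longWords then
        let chars := if v ≠ 0 then chars + i * 3 else chars
        if ¬(-32768 ≤ v ∧ v ≤ 32767) then chars + i * 12 else chars
      else
        let chars := if v ≠ 0 then chars + i else chars
        if ¬(-128 ≤ v ∧ v ≤ 127) then chars + i * 2 else chars
    rcLoopB rest longWords chars (i <<< 4)

def row_characteristics_py_alt (row : List Int) : Int :=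
  let longWords := row.any (fun v => !(decide (-32768 ≤ v ∧ v ≤ 32767)))
  rcLoopB row longWords 0 1

-- ===== PRECONDITION & SPEC =====
def Spec_row_characteristics_py (row : List Int) (out : Int) : Prop := out = row_characteristics_py_alt row
instance (row : List Int) (out : Int) : Decidable (Spec_row_characteristics_py row out) := by unfold Spec_row_characteristics_py; infer_instance

-- ===== CLAIM (what is proved, stated in full; the proofs are below) =====
def Claim_equal_row_characteristics_py : Prop := ∀ (row : List Int), Dom_row_characteristics_py row → Spec_row_characteristics_py row (row_characteristics_py row)

-- ===== LEMMAS AND PROOFS =====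

-- A's break flag is exactly B's any() scan.
theorem rcLoopA1_snd (row : List Int) : ∀ chars i,
    (rcLoopA1 row chars i).2 = row.any (fun v => !(decide (-32768 ≤ v ∧ v ≤ 32767))) := by
  induction row with
  | nil => intro chars i; simp [rcLoopA1]
  | cons v rest ih =>
    intro chars i
    simp only [rcLoopA1, List.any_cons]
    by_cases h : -32768 ≤ v ∧ v ≤ 32767 <;> simp [h, ih]

-- When no value is out of 16-bit range, A's first loop computes B's short-branch accumulation.
theorem rcLoopA1_fst (row : List Int)
    (h : row.any (fun v => !(decide (-32768 ≤ v ∧ v ≤ 32767))) = false) : ∀ chars i,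
    (rcLoopA1 row chars i).1 = rcLoopB row false chars i := by
  induction row with
  | nil => intro chars i; simp [rcLoopA1, rcLoopB]
  | cons v rest ih =>
    simp only [List.any_cons, Bool.or_eq_false_iff, Bool.not_eq_false', decide_eq_true_eq] at h
    intro chars i
    simp only [rcLoopA1, rcLoopB, h.1]
    exact ih h.2 _ _

-- A's redo loop is B's long-branch accumulation.
theorem rcLoopA2_eq (row : List Int) : ∀ chars i,
    rcLoopA2 row chars i = rcLoopB row true chars i := by
  induction row with
  | nil => intro chars i; rfl
  | cons v rest ih => intro chars i; simp only [rcLoopA2, rcLoopB]; exact ih _ _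

-- ===== VERDICT (by name: the statement is the Claim_ definition above) =====
theorem row_characteristics_py_spec : Claim_equal_row_characteristics_py := by
  intro row _
  unfold Spec_row_characteristics_py row_characteristics_py row_characteristics_py_alt
  cases h : row.any (fun v => !(decide (-32768 ≤ v ∧ v ≤ 32767))) with
  | true =>
    show (if (rcLoopA1 row 0 1).2 = true then rcLoopA2 row 0 1 else (rcLoopA1 row 0 1).1)
        = rcLoopB row true 0 1
    rw [rcLoopA1_snd, h, if_pos rfl, rcLoopA2_eq]
  | false =>
    show (if (rcLoopA1 row 0 1).2 = true then rcLoopA2 row 0 1 else (rcLoopA1 row 0 1).1)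
        = rcLoopB row false 0 1
    rw [rcLoopA1_snd, h, if_neg Bool.false_ne_true, rcLoopA1_fst row h]
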